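-- pv_equiv track=rewrite | github.com/Rudd-O/musictoolbox | lib/musictoolbox/sync/algo.py | vfatprotect
-- ===== SOURCE A (Python) =====
-- def vfatprotect(f: str) -> str:
--     """Replace illegal characters in VFAT file system paths."""
--     for illegal in '?<>\\:*|"^':
--         f = f.replace(illegal, "_")
--     while "./" in f:
--         f = f.replace("./", "/")
--     while " /" in f:
--         f = f.replace(" /", "/")
--     return f
-- ===== SOURCE B (Python) =====
-- def vfatprotect(f: str) -> str:
--     """Single right-to-left pass: substitute illegal characters and collapse
--     '.'-runs (then ' '-runs) before '/' with a small state machine."""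
--     out = []
--     mode = 0  # 0 = NORMAL, 1 = dropping dots after '/', 2 = dropping spaces
--     for c in reversed(f):
--         if c in '?<>\\:*|"^':
--             c = '_'
--         if c == '/':
--             out.append(c)
--             mode = 1
--         elif mode == 1:
--             if c == '.':
--                 pass
--             elif c == ' ':
--                 mode = 2
--             else:
--                 out.append(c)
--                 mode = 0
--         elif mode == 2:
--             if c == ' ':
--                 pass
--             else:
--                 out.append(c)
--                 mode = 0
--         else:
--             out.append(c)
--     return ''.join(reversed(out))
-- ===== Notes on version B (the rewrite author's own statement) =====
-- stated objective: alternative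
-- what changed: Replaces the nine sequential str.replace passes and the two repeated-replace while loops by a single right-to-left scan with a three-state machine (substitute illegal chars inline; after '/' drop the '.'-run, then the ' '-run).
import Mathlib
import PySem

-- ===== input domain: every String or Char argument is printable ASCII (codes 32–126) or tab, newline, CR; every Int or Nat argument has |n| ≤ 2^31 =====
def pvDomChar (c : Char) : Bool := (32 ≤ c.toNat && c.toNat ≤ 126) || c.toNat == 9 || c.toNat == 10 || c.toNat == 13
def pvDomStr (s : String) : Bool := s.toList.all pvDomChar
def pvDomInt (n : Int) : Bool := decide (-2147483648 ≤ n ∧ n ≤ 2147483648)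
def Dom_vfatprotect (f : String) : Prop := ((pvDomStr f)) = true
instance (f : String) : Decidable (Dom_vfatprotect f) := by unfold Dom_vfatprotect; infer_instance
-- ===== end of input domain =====

-- B replaces A's nine sequential str.replace passes and the two repeated-replace while loops by one
-- right-to-left scan with a three-state machine; same return value, no side effects in either.

-- ===== PORT A =====
-- helper characterization, cited by the ports' `decreasing_by`: what ONE pass of
-- `f.replace(x + "/", "/")` computes for a two-char pattern x::z.
def pvR1 (x z : Char) : List Char → List Char
  | [] => []
  | [a] => [a]
  | a :: b :: t => if a = x ∧ b = z then z :: pvR1 x z t else a :: pvR1 x z (b :: t)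

theorem pvGo_eq (x z : Char) : ∀ (fuel : Nat) (l acc : List Char), l.length ≤ fuel →
    PySem.Chars.replace.go [x, z] [z] fuel l acc = acc.reverse ++ pvR1 x z l := by
  intro fuel
  induction fuel with
  | zero =>
    intro l acc h
    interval_cases hl : l.length
    rw [List.length_eq_zero_iff] at hl; subst hl
    simp [PySem.Chars.replace.go, pvR1]
  | succ n ih =>
    intro l acc h
    match l with
    | [] => simp [PySem.Chars.replace.go, pvR1]
    | [a] =>
      simp only [PySem.Chars.replace.go]
      have hp : [x, z].isPrefixOf [a] = false := by
        simp [List.isPrefixOf]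
      rw [hp]
      simp only [Bool.false_eq_true, if_false]
      rw [ih [] (a :: acc) (by simp)]
      simp [pvR1]
    | a :: b :: t =>
      simp only [PySem.Chars.replace.go]
      by_cases hab : a = x ∧ b = z
      · have hp : [x, z].isPrefixOf (a :: b :: t) = true := by
          simp [List.isPrefixOf, hab.1, hab.2]
        rw [hp]
        simp only [if_true]
        have hd : List.drop [x,z].length (a :: b :: t) = t := by simp
        rw [hd, ih t ([z].reverse ++ acc) (by simp at h ⊢; omega)]
        simp [pvR1, hab.1, hab.2]
      · have hp : [x, z].isPrefixOf (a :: b :: t) = false := by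
          simp [List.isPrefixOf]
          intro h1 h2; exact absurd ⟨h1.symm, h2.symm⟩ hab
        rw [hp]
        simp only [Bool.false_eq_true, if_false]
        rw [ih (b :: t) (a :: acc) (by simp at h ⊢; omega)]
        simp [pvR1, hab]

theorem pvReplace_eq_R1 (x z : Char) (l : List Char) :
    PySem.Chars.replace l [x, z] [z] = pvR1 x z l := by
  rw [PySem.Chars.replace]
  simp only [List.isEmpty_cons, Bool.false_eq_true, if_false]
  rw [pvGo_eq x z l.length l [] le_rfl]
  simp

theorem pvR1_length_lt (x z : Char) (l : List Char) (h : [x, z] <:+: l) :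
    (pvR1 x z l).length < l.length := by
  fun_induction pvR1 with
  | case1 => simp at h
  | case2 a =>
    exfalso
    obtain ⟨s, t, hst⟩ := h
    rcases s with _ | ⟨c, s⟩ <;> simp_all
  | case3 a b t hab ih =>
    have : (pvR1 x z t).length ≤ t.length := by
      clear h hab ih
      fun_induction pvR1 <;> simp_all <;> omega
    simp; omega
  | case4 a b t hab ih =>
    have h' : [x, z] <:+: b :: t := by
      rcases (List.infix_cons_iff.mp h) with hp | hi
      · exfalso
        rcases hp with ⟨t', ht'⟩
        simp at ht'
        exact hab ⟨ht'.1.symm, ht'.2.1.symm⟩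
      · exact hi
    have := ih h'
    simp at this ⊢
    omega

-- the two while loops of A
def pvDotsLoop (f : String) : String :=
  if h : PySem.Str.isIn "./" f = true then pvDotsLoop (PySem.Str.replace f "./" "/") else f
termination_by f.toList.length
decreasing_by
  have hinf : ['.', '/'] <:+: f.toList := by
    rw [PySem.Str.isIn_iff_infix] at h
    exact h
  have : (PySem.Str.replace f "./" "/").toList = pvR1 '.' '/' f.toList := by
    rw [PySem.Str.toList_replace]
    exact pvReplace_eq_R1 '.' '/' f.toList
  rw [this]
  exact pvR1_length_lt '.' '/' f.toList hinf

def pvSpacesLoop (f : String) : String :=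
  if h : PySem.Str.isIn " /" f = true then pvSpacesLoop (PySem.Str.replace f " /" "/") else f
termination_by f.toList.length
decreasing_by
  have hinf : [' ', '/'] <:+: f.toList := by
    rw [PySem.Str.isIn_iff_infix] at h
    exact h
  have : (PySem.Str.replace f " /" "/").toList = pvR1 ' ' '/' f.toList := by
    rw [PySem.Str.toList_replace]
    exact pvReplace_eq_R1 ' ' '/' f.toList
  rw [this]
  exact pvR1_length_lt ' ' '/' f.toList hinf

def vfatprotect (f : String) : String :=
  let f1 := List.foldl (fun s c => PySem.Str.replace s (String.ofList [c]) "_") f "?<>\\:*|\"^".toList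
  pvSpacesLoop (pvDotsLoop f1)

-- ===== PORT B =====
-- one step of Source B's loop body: substitute an illegal character, then the mode automaton.
-- state = (collected chars newest-first ≙ python's `out` before the final reverse, mode)
def pvStep (s : List Char × Nat) (c0 : Char) : List Char × Nat :=
  let c := if c0 ∈ "?<>\\:*|\"^".toList then '_' else c0
  if c = '/' then (c :: s.1, 1)
  else if s.2 = 1 then
    if c = '.' then s
    else if c = ' ' then (s.1, 2)
    else (c :: s.1, 0)
  else if s.2 = 2 then
    if c = ' ' then s else (c :: s.1, 0)
  else (c :: s.1, s.2)

def vfatprotect_alt (f : String) : String :=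
  String.ofList (f.toList.reverse.foldl pvStep ([], 0)).1

-- ===== PRECONDITION & SPEC =====
def Spec_vfatprotect (f : String) (out : String) : Prop := out = vfatprotect_alt f
instance (f : String) (out : String) : Decidable (Spec_vfatprotect f out) := by unfold Spec_vfatprotect; infer_instance

-- ===== CLAIM (what is proved, stated in full; the proofs are below) =====
def Claim_equal_vfatprotect : Prop := ∀ (f : String), Dom_vfatprotect f → Spec_vfatprotect f (vfatprotect f)

-- ===== LEMMAS AND PROOFS =====

-- the illegal-character substitution both programs perform
def pvSubst (c : Char) : Char := if c ∈ "?<>\\:*|\"^".toList then '_' else c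

-- "a (possibly empty) run of x then '/'" — what A's corresponding while loop deletes before
def pvLD (x : Char) (t : List Char) : Bool := (t.dropWhile (· = x)).head? == some '/'

-- fixpoint of one while loop: every x-run directly before a '/' removed
def pvElim (x : Char) : List Char → List Char
  | [] => []
  | c :: t => if c = x ∧ pvLD x t then pvElim x t else c :: pvElim x t

-- B's machine is in mode 2 before t iff t is ≥1 spaces, then dots, then '/'
def pvLS (t : List Char) : Bool := t.head? == some ' ' && pvLD '.' (t.dropWhile (· = ' '))

-- structural (head-first) description of B's machine: its mode and its output before t
def pvM : List Char → Nat
  | [] => 0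
  | c :: t => if c = '/' then 1
      else if pvM t = 1 then (if c = '.' then 1 else if c = ' ' then 2 else 0)
      else if pvM t = 2 then (if c = ' ' then 2 else 0)
      else 0

def pvOut : List Char → List Char
  | [] => []
  | c :: t => if c = '/' then c :: pvOut t
      else if pvM t = 1 then (if c = '.' then pvOut t else if c = ' ' then pvOut t else c :: pvOut t)
      else if pvM t = 2 then (if c = ' ' then pvOut t else c :: pvOut t)
      else c :: pvOut t

theorem pvM_cases (t : List Char) : pvM t = 0 ∨ pvM t = 1 ∨ pvM t = 2 := by
  cases t with
  | nil => simp [pvM]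
  | cons c r => simp only [pvM]; split_ifs <;> simp

-- B's foldl over the reversed list computes (pvOut, pvM) of the substituted list
theorem pvFoldl_eq (l : List Char) :
    l.reverse.foldl pvStep ([], 0) = (pvOut (l.map pvSubst), pvM (l.map pvSubst)) := by
  induction l with
  | nil => simp [pvOut, pvM]
  | cons c t ih =>
    have : (c :: t).reverse = t.reverse ++ [c] := by simp
    rw [this, List.foldl_append, ih]
    simp only [List.foldl_cons, List.foldl_nil, List.map_cons]
    show pvStep (pvOut (t.map pvSubst), pvM (t.map pvSubst)) c
        = (pvOut (pvSubst c :: t.map pvSubst), pvM (pvSubst c :: t.map pvSubst))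
    generalize t.map pvSubst = r
    simp only [pvStep, pvSubst, pvOut, pvM]
    rcases pvM_cases r with h | h | h <;> split_ifs <;> simp_all

-- a single-character str.replace is a pointwise map
theorem pvGoSingle_eq (c d : Char) : ∀ (fuel : Nat) (l acc : List Char), l.length ≤ fuel →
    PySem.Chars.replace.go [c] [d] fuel l acc
      = acc.reverse ++ l.map (fun a => if a = c then d else a) := by
  intro fuel
  induction fuel with
  | zero =>
    intro l acc h
    interval_cases hl : l.length
    rw [List.length_eq_zero_iff] at hl; subst hl
    simp [PySem.Chars.replace.go]
  | succ n ih =>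
    intro l acc h
    match l with
    | [] => simp [PySem.Chars.replace.go]
    | a :: t =>
      simp only [PySem.Chars.replace.go]
      by_cases hac : a = c
      · have hp : [c].isPrefixOf (a :: t) = true := by simp [List.isPrefixOf, hac]
        rw [hp]
        simp only [if_true]
        have hd : List.drop [c].length (a :: t) = t := by simp
        rw [hd, ih t ([d].reverse ++ acc) (by simp at h ⊢; omega)]
        simp [hac]
      · have hp : [c].isPrefixOf (a :: t) = false := by
          simp [List.isPrefixOf]; exact fun h' => absurd h'.symm hac
        rw [hp]
        simp only [Bool.false_eq_true, if_false]
        rw [ih t (a :: acc) (by simp at h ⊢; omega)]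
        simp [hac]

theorem pvReplaceSingle (c d : Char) (l : List Char) :
    PySem.Chars.replace l [c] [d] = l.map (fun a => if a = c then d else a) := by
  rw [PySem.Chars.replace]
  simp only [List.isEmpty_cons, Bool.false_eq_true, if_false]
  rw [pvGoSingle_eq c d l.length l [] le_rfl]
  simp

-- A's first for loop is the pointwise substitution of the illegal characters
theorem pvFoldRepl : ∀ (cs : List Char) (f : String), '_' ∉ cs →
    (List.foldl (fun s c => PySem.Str.replace s (String.ofList [c]) "_") f cs).toList
      = f.toList.map (fun a => if a ∈ cs then '_' else a) := by
  intro cs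
  induction cs with
  | nil => intro f _; simp
  | cons c cs ih =>
    intro f hu
    rw [List.foldl_cons, ih _ (by simp at hu; exact hu.2)]
    have hstep : (PySem.Str.replace f (String.ofList [c]) "_").toList
        = f.toList.map (fun a => if a = c then '_' else a) := by
      rw [PySem.Str.toList_replace]
      rw [show (String.ofList [c]).toList = [c] from String.toList_ofList ..,
          show ("_" : String).toList = ['_'] from rfl]
      exact pvReplaceSingle c '_' f.toList
    rw [hstep, List.map_map]
    refine List.map_congr_left ?_
    intro a _
    simp only [Function.comp_apply]
    by_cases hac : a = c
    · subst hac
      simp only [List.mem_cons, not_or] at hu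
      simp [Ne.symm hu.1]
    · by_cases hm : a ∈ cs <;> simp [hac, hm]

theorem pvChain_eq (f : String) :
    (List.foldl (fun s c => PySem.Str.replace s (String.ofList [c]) "_") f "?<>\\:*|\"^".toList).toList
      = f.toList.map pvSubst := by
  rw [pvFoldRepl _ f (by decide)]
  rfl

theorem pvLD_cons (x c : Char) (t : List Char) :
    pvLD x (c :: t) = if c = x then pvLD x t else (c == '/') := by
  simp only [pvLD, List.dropWhile_cons]
  split_ifs with h <;> simp_all

-- one replace pass preserves pvLD and pvElim
theorem pvLD_R1 (x : Char) (hx : x ≠ '/') : ∀ l, pvLD x (pvR1 x '/' l) = pvLD x l := by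
  intro l
  fun_induction pvR1 with
  | case1 => rfl
  | case2 a => rfl
  | case3 a b t hab ih =>
    simp [pvLD_cons, hab.1, hab.2, Ne.symm hx]
  | case4 a b t hab ih =>
    by_cases hax : a = x
    · simp [pvLD_cons, hax, ih]
    · simp [pvLD_cons, hax]

theorem pvElim_R1 (x : Char) (hx : x ≠ '/') : ∀ l, pvElim x (pvR1 x '/' l) = pvElim x l := by
  intro l
  fun_induction pvR1 with
  | case1 => rfl
  | case2 a => rfl
  | case3 a b t hab ih =>
    have h1 : pvLD x (b :: t) = true := by simp [pvLD_cons, hab.2, Ne.symm hx]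
    rw [show pvElim x (a :: b :: t) = pvElim x (b :: t) by
          rw [pvElim]; simp [hab.1, h1]]
    rw [pvElim, pvElim]
    simp [hab.2, Ne.symm hx, ih]
  | case4 a b t hab ih =>
    rw [pvElim, pvElim, pvLD_R1 x hx, ih]

theorem pvLD_imp_infix (x : Char) : ∀ t, pvLD x t = true → [x, '/'] <:+: (x :: t) := by
  intro t
  induction t with
  | nil => intro h; simp [pvLD] at h
  | cons y r ih =>
    intro h
    rw [pvLD_cons] at h
    by_cases hyx : y = x
    · rw [if_pos hyx] at h
      subst hyx
      exact (ih h).trans (List.suffix_cons _ _).isInfix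
    · rw [if_neg hyx] at h
      simp at h
      subst h
      exact ⟨[], r, rfl⟩

theorem pvElim_id (x : Char) : ∀ l, ¬([x, '/'] <:+: l) → pvElim x l = l := by
  intro l
  induction l with
  | nil => intro _; rfl
  | cons c t ih =>
    intro h
    have ht : ¬([x, '/'] <:+: t) := fun hi => h (hi.trans (List.suffix_cons c t).isInfix)
    rw [pvElim]
    have hc : ¬(c = x ∧ pvLD x t) := by
      rintro ⟨rfl, hld⟩
      exact h (pvLD_imp_infix _ t hld)
    rw [if_neg hc, ih ht]

theorem pvL2 (t : List Char) :
    pvLD '.' (t.dropWhile (· = ' ')) = (pvLD '.' t || pvLS t) := by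
  cases t with
  | nil => rfl
  | cons c r =>
    by_cases hc : c = ' '
    · subst hc
      simp only [List.dropWhile_cons, pvLS, pvLD_cons]
      simp [pvLD_cons]
    · simp [List.dropWhile_cons, hc, pvLS]

-- the space-machine trigger after dot-elimination
theorem pvLD_elim (r : List Char) :
    pvLD ' ' (pvElim '.' r) = (pvLD '.' r || pvLS r) := by
  induction r with
  | nil => rfl
  | cons d t ih =>
    rw [pvElim]
    by_cases hd : d = '.' ∧ pvLD '.' t
    · rw [if_pos hd, ih]
      simp [pvLD_cons, hd.1, hd.2, pvLS]
    · rw [if_neg hd]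
      by_cases h1 : d = ' '
      · subst h1
        rw [pvLD_cons, if_pos rfl, ih]
        have : pvLD '.' (' ' :: t) = false := by simp [pvLD_cons]
        rw [this]
        simp only [Bool.false_or]
        rw [show pvLS (' ' :: t) = pvLD '.' (List.dropWhile (· = ' ') t) by
              simp [pvLS, List.dropWhile_cons]]
        exact (pvL2 t).symm
      · by_cases h2 : d = '/'
        · subst h2
          simp [pvLD_cons, pvLS]
        · by_cases h3 : d = '.'
          · subst h3
            have hnt : pvLD '.' t = false := by
              cases hld : pvLD '.' t
              · rfl
              · exact absurd ⟨rfl, hld⟩ hd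
            simp [pvLD_cons, h1, hnt, pvLS]
          · simp [pvLD_cons, h1, h2, h3, pvLS]

-- grand lemma: the machine output IS the two successive eliminations
theorem pvGrand (t : List Char) :
    pvOut t = pvElim ' ' (pvElim '.' t) ∧
      pvM t = (if pvLD '.' t then 1 else if pvLS t then 2 else 0) := by
  induction t with
  | nil => exact ⟨rfl, rfl⟩
  | cons c t ih =>
    obtain ⟨iho, ihm⟩ := ih
    rw [pvOut, pvM, ihm, iho]
    by_cases h1 : c = '/'
    · subst h1
      constructor
      · rw [show pvElim '.' ('/' :: t) = '/' :: pvElim '.' t by rw [pvElim]; simp,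
            show pvElim ' ' ('/' :: pvElim '.' t) = '/' :: pvElim ' ' (pvElim '.' t) by
              rw [pvElim]; simp]
        simp
      · simp [pvLD_cons]
    · by_cases h2 : c = '.'
      · subst h2
        by_cases hld : pvLD '.' t
        · -- dropped by the dots elimination; machine is in mode 1 and drops it
          rw [show pvElim '.' ('.' :: t) = pvElim '.' t by rw [pvElim]; simp [hld]]
          constructor
          · simp [hld]
          · simp [pvLD_cons, hld]
        · rw [show pvElim '.' ('.' :: t) = '.' :: pvElim '.' t by rw [pvElim]; simp [hld]]
          rw [show pvElim ' ' ('.' :: pvElim '.' t) = '.' :: pvElim ' ' (pvElim '.' t) by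
                rw [pvElim]; simp]
          constructor
          · by_cases hls : pvLS t <;> simp [hld, hls]
          · by_cases hls : pvLS t <;> simp [pvLD_cons, hld, hls, pvLS] <;> (try (split_ifs <;> simp))
      · by_cases h3 : c = ' '
        · subst h3
          rw [show pvElim '.' (' ' :: t) = ' ' :: pvElim '.' t by rw [pvElim]; simp]
          rw [show pvElim ' ' (' ' :: pvElim '.' t)
                = if pvLD ' ' (pvElim '.' t) then pvElim ' ' (pvElim '.' t)
                  else ' ' :: pvElim ' ' (pvElim '.' t) by rw [pvElim]; split_ifs <;> simp_all]
          rw [pvLD_elim]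
          have hmls : pvLS (' ' :: t) = pvLD '.' (List.dropWhile (· = ' ') t) := by
            simp [pvLS, List.dropWhile_cons]
          have hLDs : pvLD '.' (' ' :: t) = false := by simp [pvLD_cons]
          constructor
          · by_cases hld : pvLD '.' t
            · simp [hld]
            · by_cases hls : pvLS t <;> simp [hld, hls]
          · rw [hLDs, hmls, pvL2]
            by_cases hld : pvLD '.' t
            · simp [hld]
            · by_cases hls : pvLS t <;> simp [hld, hls]
        · -- ordinary character: always emitted, machine returns to mode 0
          rw [show pvElim '.' (c :: t) = c :: pvElim '.' t by rw [pvElim]; simp [h2]]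
          rw [show pvElim ' ' (c :: pvElim '.' t) = c :: pvElim ' ' (pvElim '.' t) by
                rw [pvElim]; simp [h3]]
          constructor
          · by_cases hld : pvLD '.' t
            · simp [h1, h2, h3, hld]
            · by_cases hls : pvLS t <;> simp [h1, h2, h3, hld, hls]
          · have : pvLD '.' (c :: t) = false := by simp [pvLD_cons, h1, h2]
            rw [this]
            have : pvLS (c :: t) = false := by simp [pvLS, h3]
            rw [this]
            by_cases hld : pvLD '.' t
            · simp [h1, h2, h3, hld]
            · by_cases hls : pvLS t <;> simp [h1, h2, h3, hld, hls]

-- the two while loops compute the eliminations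
theorem pvDotsLoop_toList (f : String) : (pvDotsLoop f).toList = pvElim '.' f.toList := by
  fun_induction pvDotsLoop with
  | case1 f h ih =>
    have hrep : (PySem.Str.replace f "./" "/").toList = pvR1 '.' '/' f.toList := by
      rw [PySem.Str.toList_replace]
      exact pvReplace_eq_R1 '.' '/' f.toList
    rw [ih, hrep, pvElim_R1 '.' (by decide)]
  | case2 f h =>
    have hni : ¬(['.', '/'] <:+: f.toList) := by
      intro hi
      exact h ((PySem.Str.isIn_iff_infix "./" f).mpr hi)
    exact (pvElim_id '.' f.toList hni).symm

theorem pvSpacesLoop_toList (f : String) : (pvSpacesLoop f).toList = pvElim ' ' f.toList := by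
  fun_induction pvSpacesLoop with
  | case1 f h ih =>
    have hrep : (PySem.Str.replace f " /" "/").toList = pvR1 ' ' '/' f.toList := by
      rw [PySem.Str.toList_replace]
      exact pvReplace_eq_R1 ' ' '/' f.toList
    rw [ih, hrep, pvElim_R1 ' ' (by decide)]
  | case2 f h =>
    have hni : ¬([' ', '/'] <:+: f.toList) := by
      intro hi
      exact h ((PySem.Str.isIn_iff_infix " /" f).mpr hi)
    exact (pvElim_id ' ' f.toList hni).symm

theorem pvMain (f : String) : vfatprotect f = vfatprotect_alt f := by
  have hA : (vfatprotect f).toList = pvElim ' ' (pvElim '.' (f.toList.map pvSubst)) := by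
    show (pvSpacesLoop (pvDotsLoop _)).toList = _
    rw [pvSpacesLoop_toList, pvDotsLoop_toList, pvChain_eq]
  have hB : (vfatprotect_alt f).toList = pvElim ' ' (pvElim '.' (f.toList.map pvSubst)) := by
    show (String.ofList (f.toList.reverse.foldl pvStep ([], 0)).1).toList = _
    rw [pvFoldl_eq, String.toList_ofList]
    exact (pvGrand (f.toList.map pvSubst)).1
  exact String.toList_inj.mp (hA.trans hB.symm)

-- ===== VERDICT (by name: the statement is the Claim_ definition above) =====
theorem vfatprotect_spec : Claim_equal_vfatprotect := by
  intro f _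
  unfold Spec_vfatprotect
  exact pvMain f
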